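-- pv_equiv track=rewrite | github.com/kkr010128/codebert | problem064/problem064_23.py | check
-- ===== SOURCE A (Python) =====
-- def check(s, p):
--     for i in range(len(s)):
--         count = 0
--         for j in range(len(p)):
--             if s[(i+j) % len(s)] != p[j]:
--                 break
--             count += 1
--         if count == len(p):
--             return True
--     return False
-- ===== SOURCE B (Python) =====
-- def check(s, p):
--     # p matches s cyclically at some offset  <=>  p occurs in s repeated enough times
--     if not s:
--         return False
--     return p in s * (len(p) // len(s) + 2)
-- ===== Notes on version B (the rewrite author's own statement) =====
-- stated objective: faster
-- what changed: Replaces the per-offset character-by-character scan with modulo indexing by a single substring search of p in s repeated len(p)//len(s)+2 times (CPython's linear two-way string search).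
import Mathlib
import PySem

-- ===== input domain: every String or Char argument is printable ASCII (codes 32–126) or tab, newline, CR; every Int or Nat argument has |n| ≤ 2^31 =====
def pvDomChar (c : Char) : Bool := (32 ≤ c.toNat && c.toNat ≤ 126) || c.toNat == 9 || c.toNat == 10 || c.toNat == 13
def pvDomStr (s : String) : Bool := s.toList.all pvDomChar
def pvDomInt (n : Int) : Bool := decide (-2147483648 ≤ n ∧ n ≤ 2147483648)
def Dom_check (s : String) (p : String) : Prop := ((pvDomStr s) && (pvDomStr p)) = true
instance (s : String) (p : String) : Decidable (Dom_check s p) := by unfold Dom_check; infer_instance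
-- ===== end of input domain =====

-- B replaces A's per-offset character scan by one substring search of p in s repeated
-- len(p)//len(s)+2 times (objective: faster).

-- ===== PORT A =====
-- inner 'for j in range(len(p))' with break: count matching chars until the first mismatch.
-- Every index the Python reaches is in range ((i+j) % len(s) and j < len(p)), so s[..]/p[j]
-- are ported with pyGetD, which is exact on in-range indices; A never raises.
def checkInner (s p : List Char) (i : Int) (js : List Int) (count : Int) : Int :=
  match js with
  | [] => count
  | j :: rest =>
      if PySem.List.pyGetD s (PySem.Int.mod (i + j) (s.length : Int)) ' '
           ≠ PySem.List.pyGetD p j ' ' then count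
      else checkInner s p i rest (count + 1)

-- outer 'for i in range(len(s))' with early 'return True'
def checkOuter (s p : List Char) (is_ : List Int) : Bool :=
  match is_ with
  | [] => false
  | i :: rest =>
      if checkInner s p i (PySem.List.pyRange 0 (p.length : Int) 1) 0 = (p.length : Int)
      then true
      else checkOuter s p rest

def check (s : String) (p : String) : Bool :=
  checkOuter s.toList p.toList (PySem.List.pyRange 0 (s.toList.length : Int) 1)

-- ===== PORT B =====
def check_alt (s : String) (p : String) : Bool :=
  if s.toList.length = 0 then false
  else PySem.Chars.isIn p.toList
         (PySem.List.pyRepeat s.toList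
           (PySem.Int.floordiv (p.toList.length : Int) (s.toList.length : Int) + 2))

-- ===== PRECONDITION & SPEC =====
def Spec_check (s : String) (p : String) (out : Bool) : Prop := out = check_alt s p
instance (s : String) (p : String) (out : Bool) : Decidable (Spec_check s p out) := by unfold Spec_check; infer_instance

-- ===== CLAIM (what is proved, stated in full; the proofs are below) =====
def Claim_equal_check : Prop := ∀ (s : String) (p : String), Dom_check s p → Spec_check s p (check s p)

-- ===== LEMMAS AND PROOFS =====

-- cyclic match of p against s at offset i
def CycMatch (s p : List Char) (i : Nat) : Prop :=
  ∀ j : Nat, j < p.length → s[(i + j) % s.length]? = p[j]?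

lemma pymod_natCast (a b : Nat) :
    PySem.Int.mod (a : Int) (b : Int) = ((a % b : Nat) : Int) := by
  show ((a : Int).fmod b) = _
  rw [Int.fmod_eq_emod]; simp

lemma pyGetD_eq_getElem?_some {α : Type} (xs : List α) (k : Nat) (d : α) (hk : k < xs.length) :
    some (PySem.List.pyGetD xs (k : Int) d) = xs[k]? := by
  rw [PySem.List.pyGetD_natCast, List.getD_eq_getElem?_getD, List.getElem?_eq_getElem hk]
  rfl

-- A's inner loop reaches len(p) iff every remaining position matches
lemma inner_iff (s p : List Char) (hn : 0 < s.length) (i : Nat) :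
    ∀ c : Nat, c ≤ p.length →
      (checkInner s p (i : Int) (PySem.List.pyRange (c : Int) (p.length : Int) 1) (c : Int)
          = (p.length : Int)
        ↔ ∀ j : Nat, c ≤ j → j < p.length → s[(i + j) % s.length]? = p[j]?) := by
  intro c hc
  induction hd : p.length - c generalizing c with
  | zero =>
      have hce : c = p.length := by omega
      subst hce
      have hnil : PySem.List.pyRange (p.length : Int) (p.length : Int) = [] := by
        simp
      rw [hnil]
      constructor
      · intro _ j h1 h2; exact absurd h2 (by omega)
      · intro _; rfl
  | succ k ih =>
      have hlt : c < p.length := by omega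
      rw [PySem.List.pyRange_one_cons (by exact_mod_cast hlt)]
      show (if _ ≠ _ then (c:Int) else checkInner s p i _ ((c:Int)+1)) = _ ↔ _
      rw [show ((c:Int)+1) = ((c+1 : Nat) : Int) by push_cast; ring]
      have hmod : (i : Int) + (c : Int) = ((i + c : Nat) : Int) := by push_cast; ring
      by_cases hm : s[(i + c) % s.length]? = p[c]?
      · have heq : PySem.List.pyGetD s (PySem.Int.mod ((i:Int) + (c:Int)) (s.length : Int)) ' '
            = PySem.List.pyGetD p (c : Int) ' ' := by
          rw [hmod, pymod_natCast]
          have h1 := pyGetD_eq_getElem?_some s ((i+c) % s.length) ' ' (Nat.mod_lt _ hn)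
          have h2 := pyGetD_eq_getElem?_some p c ' ' hlt
          exact Option.some.inj (h1.trans (hm.trans h2.symm))
        rw [if_neg (by simpa using heq)]
        rw [ih (c+1) (by omega) (by omega)]
        constructor
        · intro h j h1 h2
          rcases Nat.eq_or_lt_of_le h1 with rfl | hl
          · exact hm
          · exact h j hl h2
        · intro h j h1 h2; exact h j (by omega) h2
      · have hne : PySem.List.pyGetD s (PySem.Int.mod ((i:Int) + (c:Int)) (s.length : Int)) ' '
            ≠ PySem.List.pyGetD p (c : Int) ' ' := by
          rw [hmod, pymod_natCast]
          intro hEq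
          apply hm
          rw [← pyGetD_eq_getElem?_some s ((i+c) % s.length) ' ' (Nat.mod_lt _ hn),
              ← pyGetD_eq_getElem?_some p c ' ' hlt, hEq]
        rw [if_pos (by simpa using hne)]
        constructor
        · intro h; exact absurd (by exact_mod_cast h : c = p.length) (by omega)
        · intro h; exact absurd (h c le_rfl hlt) hm

-- A's outer loop succeeds iff some remaining offset matches cyclically
lemma outer_iff (s p : List Char) (hn : 0 < s.length) :
    ∀ a : Nat, a ≤ s.length →
      (checkOuter s p (PySem.List.pyRange (a : Int) (s.length : Int) 1) = true
        ↔ ∃ i : Nat, a ≤ i ∧ i < s.length ∧ CycMatch s p i) := by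
  intro a ha
  induction hd : s.length - a generalizing a with
  | zero =>
      have hae : a = s.length := by omega
      subst hae
      have hnil : PySem.List.pyRange (s.length : Int) (s.length : Int) = [] := by
        simp
      rw [hnil]
      constructor
      · intro h; exact absurd h (by simp [checkOuter])
      · rintro ⟨i, h1, h2, _⟩; omega
  | succ k ih =>
      have hlt : a < s.length := by omega
      rw [PySem.List.pyRange_one_cons (by exact_mod_cast hlt)]
      show (if checkInner s p (a:Int) (PySem.List.pyRange 0 (p.length:Int) 1) 0
              = (p.length:Int) then true else checkOuter s p _) = true ↔ _
      rw [show ((a:Int)+1) = ((a+1 : Nat) : Int) by push_cast; ring]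
      have hin := inner_iff s p hn a 0 (Nat.zero_le _)
      simp only [Nat.cast_zero] at hin
      by_cases hcond : checkInner s p (a:Int) (PySem.List.pyRange 0 (p.length:Int) 1) 0
          = (p.length:Int)
      · rw [if_pos hcond]
        simp only [true_iff]
        exact ⟨a, le_rfl, hlt, fun j hj => (hin.mp hcond) j (Nat.zero_le _) hj⟩
      · rw [if_neg hcond]
        rw [ih (a+1) (by omega) (by omega)]
        constructor
        · rintro ⟨i, h1, h2, h3⟩; exact ⟨i, by omega, h2, h3⟩
        · rintro ⟨i, h1, h2, h3⟩
          rcases Nat.eq_or_lt_of_le h1 with rfl | hl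
          · exact absurd (hin.mpr (fun j _ hj => h3 j hj)) hcond
          · exact ⟨i, by omega, h2, h3⟩

lemma flatten_replicate_length {α : Type} (s : List α) (K : Nat) :
    (List.replicate K s).flatten.length = K * s.length := by
  induction K with
  | zero => simp
  | succ k ih => simp [List.replicate_succ, ih]; ring

-- periodicity of the repeated string
lemma flatten_replicate_getElem? {α : Type} (s : List α) :
    ∀ (K x : Nat), x < K * s.length →
      (List.replicate K s).flatten[x]? = s[x % s.length]? := by
  intro K
  induction K with
  | zero => intro x hx; simp at hx
  | succ k ih =>
      intro x hx
      rw [List.replicate_succ, List.flatten_cons, List.getElem?_append]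
      by_cases h : x < s.length
      · rw [if_pos h, Nat.mod_eq_of_lt h]
      · rw [if_neg h, ih (x - s.length)
              (by have h2 : (k+1) * s.length = k * s.length + s.length := Nat.succ_mul k s.length
                  omega)]
        rw [(Nat.mod_eq_sub_mod (Nat.le_of_not_lt h)).symm]

-- a cyclic match at some offset < n  ↔  p occurs in s repeated K times, when n*K ≥ n + m
lemma bridge (s p : List Char) (hn : 0 < s.length) (K : Nat)
    (hK : s.length + p.length ≤ K * s.length) :
    ((∃ i : Nat, i < s.length ∧ CycMatch s p i)
      ↔ PySem.Chars.isIn p (List.replicate K s).flatten = true) := by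
  have hlen : (List.replicate K s).flatten.length = K * s.length :=
    flatten_replicate_length s K
  rw [← PySem.Chars.exists_prefix_drop_iff_isIn]
  constructor
  · rintro ⟨i, hi, hcyc⟩
    refine ⟨i, ?_⟩
    rw [List.prefix_iff_eq_take]
    apply List.ext_getElem?
    intro j
    rw [List.getElem?_take]
    by_cases hj : j < p.length
    · rw [if_pos hj, List.getElem?_drop,
          flatten_replicate_getElem? s K (i + j) (by omega)]
      exact (hcyc j hj).symm
    · rw [if_neg hj, List.getElem?_eq_none (by omega)]
  · rintro ⟨d, hpre⟩
    have hle : p.length ≤ ((List.replicate K s).flatten.drop d).length :=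
      hpre.length_le
    rw [List.length_drop, hlen] at hle
    refine ⟨d % s.length, Nat.mod_lt d hn, ?_⟩
    intro j hj
    have hp : p = List.take p.length ((List.replicate K s).flatten.drop d) :=
      List.prefix_iff_eq_take.mp hpre
    have hjd : p[j]? = (List.replicate K s).flatten[d + j]? := by
      conv_lhs => rw [hp]
      rw [List.getElem?_take, if_pos hj, List.getElem?_drop]
    rw [hjd, flatten_replicate_getElem? s K (d + j) (by omega), Nat.mod_add_mod]

theorem check_spec_aux (s p : String) : check s p = check_alt s p := by
  by_cases hn : s.toList.length = 0
  · unfold check check_alt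
    rw [if_pos hn, hn]
    have hnil : PySem.List.pyRange 0 ((0 : Nat) : Int) 1 = [] := by decide
    rw [hnil]
    rfl
  · have hn' : 0 < s.toList.length := Nat.pos_of_ne_zero hn
    unfold check check_alt
    rw [if_neg hn]
    have hfd : PySem.Int.floordiv (p.toList.length : Int) (s.toList.length : Int)
        = ((p.toList.length / s.toList.length : Nat) : Int) := by
      show Int.fdiv _ _ = _
      rw [Int.fdiv_eq_ediv]
      simp
    have hKt : (PySem.Int.floordiv (p.toList.length : Int) (s.toList.length : Int) + 2).toNat
        = p.toList.length / s.toList.length + 2 := by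
      rw [hfd]
      generalize (p.toList.length / s.toList.length) = q
      omega
    show checkOuter s.toList p.toList (PySem.List.pyRange ((0:Nat) : Int) (s.toList.length : Int) 1)
        = PySem.Chars.isIn p.toList (PySem.List.pyRepeat s.toList _)
    have hrep : PySem.List.pyRepeat s.toList
        (PySem.Int.floordiv (p.toList.length : Int) (s.toList.length : Int) + 2)
        = (List.replicate (p.toList.length / s.toList.length + 2) s.toList).flatten := by
      show (List.replicate _ s.toList).flatten = _
      rw [hKt]
    rw [hrep]
    have h3 : p.toList.length < s.toList.length * (p.toList.length / s.toList.length + 1) :=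
      Nat.lt_mul_div_succ _ hn'
    have hK : s.toList.length + p.toList.length
        ≤ (p.toList.length / s.toList.length + 2) * s.toList.length := by
      have h5 : (p.toList.length / s.toList.length + 2) * s.toList.length
          = s.toList.length + s.toList.length * (p.toList.length / s.toList.length + 1) := by
        ring
      omega
    rw [Bool.eq_iff_iff]
    rw [outer_iff s.toList p.toList hn' 0 (Nat.zero_le _)]
    rw [← bridge s.toList p.toList hn' _ hK]
    constructor
    · rintro ⟨i, _, h2, h3⟩; exact ⟨i, h2, h3⟩
    · rintro ⟨i, h2, h3⟩; exact ⟨i, Nat.zero_le _, h2, h3⟩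

-- ===== VERDICT (by name: the statement is the Claim_ definition above) =====
theorem check_spec : Claim_equal_check := by
  intro s p _
  unfold Spec_check
  exact check_spec_aux s p
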